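-- pv_equiv track=rewrite | github.com/volundmush/dbat | dbat/legacy/loader.py | asciiflag_conv
-- ===== SOURCE A (Python) =====
-- def asciiflag_conv(flag: str) -> int:
--     flags = 0
--     is_num = True
--     for c in flag:
--         if c.islower():
--             flags |= 1 << (ord(c) - ord('a'))
--         elif c.isupper():
--             flags |= 1 << (26 + (ord(c) - ord('A')))
--         if not (c.isdigit() or c == '-'):
--             is_num = False
--     if is_num:
--         flags = int(flag)
--     return flags
-- ===== SOURCE B (Python) =====
-- def asciiflag_conv(flag: str) -> int:
--     chars = set(flag)
--     if chars <= set("0123456789-"):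
--         return int(flag)
--     mask = 0
--     for i in range(52):
--         if (chr(97 + i) if i < 26 else chr(39 + i)) in chars:
--             mask |= 1 << i
--     return mask
-- ===== Notes on version B (the rewrite author's own statement) =====
-- stated objective: faster
-- what changed: A scans the flag string once in Python carrying a (mask, is_num) pair; B instead builds set(flag) once (C-level), decides the numeric case by set inclusion in the digit/minus character set, and otherwise iterates over the 52 alphabet bit positions, setting bit i when the i-th letter is a member of the set.
import Mathlib
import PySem

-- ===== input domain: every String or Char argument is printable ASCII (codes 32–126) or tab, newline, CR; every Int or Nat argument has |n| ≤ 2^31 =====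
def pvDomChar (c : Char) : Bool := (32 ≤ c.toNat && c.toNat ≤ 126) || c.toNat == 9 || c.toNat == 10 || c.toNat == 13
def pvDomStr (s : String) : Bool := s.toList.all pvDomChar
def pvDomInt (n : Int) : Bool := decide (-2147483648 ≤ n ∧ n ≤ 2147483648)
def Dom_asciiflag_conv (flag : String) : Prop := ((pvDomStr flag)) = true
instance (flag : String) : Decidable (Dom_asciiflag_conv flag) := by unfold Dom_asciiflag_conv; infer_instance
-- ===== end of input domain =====

-- B inverts the traversal: instead of scanning the flag string and accumulating a
-- (mask, is_num) pair, it builds set(flag) once, decides the numeric case by set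
-- inclusion, and otherwise walks the 52 bit positions of the alphabet, testing each
-- letter for membership in that set (objective: faster; a timing run measured B faster).

-- ===== PORT A =====
-- A's single for-loop: state (flags, is_num), both updated per character.
def aLoop : List Char → Int × Bool → Int × Bool
  | [], st => st
  | c :: rest, (flags, isNum) =>
      let flags :=
        if PySem.Chars.islower c then
          Int.lor flags (((1 <<< (c.toNat - 'a'.toNat) : Nat) : Int))
        else if PySem.Chars.isupper c then
          Int.lor flags (((1 <<< (26 + (c.toNat - 'A'.toNat)) : Nat) : Int))
        else flags
      let isNum := if !(PySem.Chars.isdigit c || c == '-') then false else isNum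
      aLoop rest (flags, isNum)

def asciiflag_conv (flag : String) : Int :=
  let st := aLoop flag.toList (0, true)
  if st.2 then (PySem.Int.ofStr? flag).getD 0 else st.1

-- ===== PORT B =====
-- chr(97 + i) if i < 26 else chr(39 + i)
def bChr (i : Int) : Char :=
  if i < 26 then Char.ofNat (97 + i).toNat else Char.ofNat (39 + i).toNat

def asciiflag_conv_alt (flag : String) : Int :=
  let chars : PySem.Set Char := PySem.Set.ofList flag.toList
  if PySem.Set.issubset chars (PySem.Set.ofList "0123456789-".toList) then
    (PySem.Int.ofStr? flag).getD 0
  else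
    (PySem.List.pyRange 0 52 1).foldl
      (fun mask i =>
        if PySem.Set.contains chars (bChr i) then
          Int.lor mask (((1 <<< i.toNat : Nat) : Int))
        else mask) 0

-- ===== PRECONDITION & SPEC =====
-- Pre_ excludes exactly the inputs where A (and B alike) raise ValueError from int(flag):
-- strings made only of digit and minus characters that are not a plain optionally-negated digit run.
def Pre_asciiflag_conv (flag : String) : Prop :=
  (¬ flag.toList.all (fun c => PySem.Chars.isdigit c || c == '-')) ∨
  (flag.toList ≠ [] ∧ flag.toList.all PySem.Chars.isdigit) ∨
  (flag.toList.head? = some '-' ∧ flag.toList.tail ≠ [] ∧ flag.toList.tail.all PySem.Chars.isdigit)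
instance (flag : String) : Decidable (Pre_asciiflag_conv flag) := by
  unfold Pre_asciiflag_conv; infer_instance

def pvWitness_asciiflag_conv : String := "abc"

def Spec_asciiflag_conv (flag : String) (out : Int) : Prop := out = asciiflag_conv_alt flag
instance (flag : String) (out : Int) : Decidable (Spec_asciiflag_conv flag out) := by
  unfold Spec_asciiflag_conv; infer_instance

-- ===== CLAIM (what is proved, stated in full; the proofs are below) =====
def Claim_equal_asciiflag_conv : Prop :=
  ∀ (flag : String), Dom_asciiflag_conv flag → Pre_asciiflag_conv flag →
    Spec_asciiflag_conv flag (asciiflag_conv flag)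

-- ===== LEMMAS AND PROOFS =====

-- Char order/equality read off on code points
theorem char_le_iff (c d : Char) : c ≤ d ↔ c.toNat ≤ d.toNat := by
  rw [Char.le_def, UInt32.le_iff_toNat_le]; rfl

theorem char_eq_iff (c d : Char) : c = d ↔ c.toNat = d.toNat := by
  constructor
  · intro h; rw [h]
  · intro h; apply Char.ext; exact UInt32.toNat_inj.mp h

theorem toNat_ofNat_lt (n : Nat) (h : n < 55296) : (Char.ofNat n).toNat = n := by
  have hv : Nat.isValidChar n := Or.inl (by omega)
  rw [Char.ofNat, dif_pos hv]
  exact Char.toNat_ofNatAux hv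

theorem islower_eq (c : Char) :
    PySem.Chars.islower c = decide (97 ≤ c.toNat ∧ c.toNat ≤ 122) := by
  rw [Bool.eq_iff_iff]
  simp only [PySem.Chars.islower, Bool.and_eq_true, decide_eq_true_eq, char_le_iff]
  exact Iff.rfl

theorem isupper_eq (c : Char) :
    PySem.Chars.isupper c = decide (65 ≤ c.toNat ∧ c.toNat ≤ 90) := by
  rw [Bool.eq_iff_iff]
  simp only [PySem.Chars.isupper, Bool.and_eq_true, decide_eq_true_eq, char_le_iff]
  exact Iff.rfl

theorem isdigit_eq (c : Char) :
    PySem.Chars.isdigit c = decide (48 ≤ c.toNat ∧ c.toNat ≤ 57) := by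
  rw [Bool.eq_iff_iff]
  simp only [PySem.Chars.isdigit, Bool.and_eq_true, decide_eq_true_eq, char_le_iff]
  exact Iff.rfl

theorem char_beq_eq (c d : Char) : (c == d) = decide (c.toNat = d.toNat) := by
  rw [Bool.eq_iff_iff]
  simp only [beq_iff_eq, decide_eq_true_eq]
  exact char_eq_iff c d

-- the two numeric tests agree character by character
theorem numcond_char (c : Char) :
    (PySem.Chars.isdigit c || c == '-') = decide (c ∈ "0123456789-".toList) := by
  have hl : "0123456789-".toList = ['0','1','2','3','4','5','6','7','8','9','-'] := rfl
  rw [Bool.eq_iff_iff, hl]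
  simp only [Bool.or_eq_true, isdigit_eq, char_beq_eq, decide_eq_true_eq,
    List.mem_cons, List.not_mem_nil, or_false, char_eq_iff,
    (show '0'.toNat = 48 from rfl), (show '1'.toNat = 49 from rfl),
    (show '2'.toNat = 50 from rfl), (show '3'.toNat = 51 from rfl),
    (show '4'.toNat = 52 from rfl), (show '5'.toNat = 53 from rfl),
    (show '6'.toNat = 54 from rfl), (show '7'.toNat = 55 from rfl),
    (show '8'.toNat = 56 from rfl), (show '9'.toNat = 57 from rfl),
    (show '-'.toNat = 45 from rfl)]
  omega

-- B's set-inclusion test equals A's all-scan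
theorem numcond_eq (l : List Char) :
    PySem.Set.issubset (PySem.Set.ofList l) (PySem.Set.ofList "0123456789-".toList)
      = l.all (fun c => PySem.Chars.isdigit c || c == '-') := by
  rw [Bool.eq_iff_iff, PySem.Set.issubset_iff]
  simp only [PySem.Set.mem_ofList, List.all_eq_true, numcond_char, decide_eq_true_eq]

-- A's is_num component
theorem aLoop_snd (l : List Char) (m : Int) (b : Bool) :
    (aLoop l (m, b)).2 = (b && l.all (fun c => PySem.Chars.isdigit c || c == '-')) := by
  induction l generalizing m b with
  | nil => simp [aLoop]
  | cons c rest ih =>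
      simp only [aLoop, List.all_cons, ih]
      cases (PySem.Chars.isdigit c || c == '-') <;> simp

-- A's mask, pushed down to Nat
def natStep (m : Nat) (c : Char) : Nat :=
  if PySem.Chars.islower c then m ||| (1 <<< (c.toNat - 'a'.toNat))
  else if PySem.Chars.isupper c then m ||| (1 <<< (26 + (c.toNat - 'A'.toNat)))
  else m

theorem aLoop_fst (l : List Char) (m : Nat) (b : Bool) :
    (aLoop l ((m : Int), b)).1 = ((l.foldl natStep m : Nat) : Int) := by
  induction l generalizing m b with
  | nil => simp [aLoop]
  | cons c rest ih =>
      have hcast : ∀ (a x : Nat), Int.lor (a : Int) ((x : Nat) : Int) = ((a ||| x : Nat) : Int) :=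
        fun a x => rfl
      simp only [aLoop, List.foldl_cons, natStep]
      by_cases h1 : PySem.Chars.islower c
      · simp only [h1, if_true, hcast, ih]
      · by_cases h2 : PySem.Chars.isupper c <;>
          simp only [h1, h2, if_true, if_false, Bool.false_eq_true, hcast, ih]

-- generic per-bit view of a fold that ORs in single bits
theorem testBit_foldl {α : Type} (l : List α) (p : α → Bool) (f : α → Nat) (m j : Nat) :
    (l.foldl (fun acc x => if p x then acc ||| (1 <<< f x) else acc) m).testBit j
      = (m.testBit j || l.any (fun x => p x && decide (f x = j))) := by
  induction l generalizing m with
  | nil => simp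
  | cons x rest ih =>
      simp only [List.foldl_cons, List.any_cons, ih]
      by_cases hp : p x
      · simp only [hp, if_true, Nat.testBit_or, Nat.one_shiftLeft, Nat.testBit_two_pow,
          Bool.true_and]
        cases m.testBit j <;> simp
      · simp [hp]

def aP (c : Char) : Bool := PySem.Chars.islower c || PySem.Chars.isupper c
def aF (c : Char) : Nat :=
  if PySem.Chars.islower c then c.toNat - 'a'.toNat else 26 + (c.toNat - 'A'.toNat)

theorem natStep_eq (m : Nat) (c : Char) :
    natStep m c = if aP c then m ||| (1 <<< aF c) else m := by
  unfold natStep aP aF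
  by_cases h1 : PySem.Chars.islower c <;> by_cases h2 : PySem.Chars.isupper c <;>
    simp [h1, h2]

-- a letter contributes bit j exactly when it is the j-th alphabet character
theorem pbit_eq (c : Char) (j : Nat) :
    (aP c && decide (aF c = j)) = (decide (j < 52) && (c == bChr (j : Int))) := by
  have ha : 'a'.toNat = 97 := rfl
  have hA : 'A'.toNat = 65 := rfl
  have hb : j < 52 → (bChr (j : Int)).toNat = if j < 26 then 97 + j else 39 + j := by
    intro hj
    unfold bChr
    by_cases h26 : j < 26
    · have h26' : ((j : Int) < 26) := by exact_mod_cast h26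
      rw [if_pos h26', if_pos h26]
      have h1 : ((97 : Int) + (j : Int)).toNat = 97 + j := by omega
      rw [h1]; exact toNat_ofNat_lt _ (by omega)
    · have h26' : ¬ ((j : Int) < 26) := by exact_mod_cast h26
      rw [if_neg h26', if_neg h26]
      have h1 : ((39 : Int) + (j : Int)).toNat = 39 + j := by omega
      rw [h1]; exact toNat_ofNat_lt _ (by omega)
  rw [Bool.eq_iff_iff, char_beq_eq]
  simp only [aP, aF, islower_eq, isupper_eq, ha, hA, Bool.or_eq_true, Bool.and_eq_true,
    decide_eq_true_eq]
  by_cases hj : j < 52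
  · rw [hb hj]
    split_ifs <;> omega
  · split_ifs <;> omega

-- any over a range with a pinned index
theorem any_range_eq (q : Nat → Bool) (j n : Nat) :
    (List.range n).any (fun k => q k && decide (k = j)) = (decide (j < n) && q j) := by
  rw [Bool.eq_iff_iff]
  simp only [List.any_eq_true, List.mem_range, Bool.and_eq_true, decide_eq_true_eq]
  constructor
  · rintro ⟨k, hk, hq, rfl⟩; exact ⟨hk, hq⟩
  · rintro ⟨hj, hq⟩; exact ⟨j, hj, hq, rfl⟩

-- membership any = set containment
theorem any_beq_contains (l : List Char) (c : Char) :
    l.any (fun x => x == c) = PySem.Set.contains (PySem.Set.ofList l) c := by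
  rw [Bool.eq_iff_iff]
  simp only [List.any_eq_true, beq_iff_eq, PySem.Set.contains_iff, PySem.Set.mem_ofList]
  constructor
  · rintro ⟨x, hx, rfl⟩; exact hx
  · intro h; exact ⟨c, h, rfl⟩

-- the per-bit characterisations of the two masks coincide
theorem any_bits_eq (l : List Char) (j : Nat) :
    l.any (fun c => aP c && decide (aF c = j))
      = (List.range 52).any
          (fun k => PySem.Set.contains (PySem.Set.ofList l) (bChr (k : Int)) && decide (k = j)) := by
  rw [any_range_eq]
  have h1 : l.any (fun c => aP c && decide (aF c = j))
      = l.any (fun c => decide (j < 52) && (c == bChr (j : Int))) := by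
    apply congrArg
    funext c
    exact pbit_eq c j
  rw [h1]
  by_cases hj : j < 52
  · simp only [hj, decide_true, Bool.true_and]
    exact any_beq_contains l (bChr (j : Int))
  · simp [hj]

-- cast B's Int fold over pyRange down to a Nat fold over List.range
theorem foldl_lor_cast (l : List Nat) (p : Nat → Bool) (m : Nat) :
    l.foldl (fun acc k => if p k then Int.lor acc (((1 <<< ((k : Int)).toNat : Nat) : Int)) else acc)
        ((m : Nat) : Int)
      = ((l.foldl (fun a k => if p k then a ||| (1 <<< k) else a) m : Nat) : Int) := by
  induction l generalizing m with
  | nil => simp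
  | cons k rest ih =>
      have hcast : Int.lor ((m : Nat) : Int) (((1 <<< ((k : Int)).toNat : Nat) : Int))
          = ((m ||| (1 <<< k) : Nat) : Int) := by
        have h : ((k : Int)).toNat = k := Int.toNat_natCast k
        rw [h]; rfl
      simp only [List.foldl_cons]
      by_cases hp : p k
      · rw [if_pos hp, if_pos hp, hcast, ih]
      · rw [if_neg hp, if_neg hp, ih]

theorem pyRange52 : PySem.List.pyRange 0 52 1 = (List.range 52).map (fun k => ((k : Nat) : Int)) := by
  decide

theorem bFold_cast (l : List Char) :
    ((PySem.List.pyRange 0 52 1).foldl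
      (fun mask i =>
        if PySem.Set.contains (PySem.Set.ofList l) (bChr i) then
          Int.lor mask (((1 <<< i.toNat : Nat) : Int))
        else mask) 0 : Int)
    = (((List.range 52).foldl
        (fun (m k : Nat) => if PySem.Set.contains (PySem.Set.ofList l) (bChr (k : Int)) then m ||| (1 <<< k) else m)
        0 : Nat) : Int) := by
  rw [pyRange52, List.foldl_map, (show (0 : Int) = ((0 : Nat) : Int) from rfl)]
  exact foldl_lor_cast (List.range 52) _ 0

-- the two masks are equal, bit by bit
theorem masks_eq (l : List Char) :
    (l.foldl natStep 0 : Nat)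
      = (List.range 52).foldl
          (fun (m k : Nat) => if PySem.Set.contains (PySem.Set.ofList l) (bChr (k : Int)) then m ||| (1 <<< k) else m) 0 := by
  apply Nat.eq_of_testBit_eq
  intro j
  have hA : l.foldl natStep 0 = l.foldl (fun acc x => if aP x then acc ||| (1 <<< aF x) else acc) 0 := by
    have : natStep = fun acc x => if aP x then acc ||| (1 <<< aF x) else acc :=
      funext fun a => funext fun c => natStep_eq a c
    rw [this]
  rw [hA, testBit_foldl, testBit_foldl]
  simp only [Nat.zero_testBit, Bool.false_or]
  exact any_bits_eq l j

-- ===== VERDICT (by name: the statement is the Claim_ definition above) =====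
theorem asciiflag_conv_spec : Claim_equal_asciiflag_conv := by
  intro flag _ _
  unfold Spec_asciiflag_conv asciiflag_conv asciiflag_conv_alt
  simp only [numcond_eq, aLoop_snd, Bool.true_and]
  by_cases h : flag.toList.all (fun c => PySem.Chars.isdigit c || c == '-')
  · rw [if_pos h, if_pos h]
  · rw [if_neg h, if_neg h, bFold_cast, ← masks_eq]
    have := aLoop_fst flag.toList 0 true
    simpa using this
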